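-- pv_equiv track=rewrite | github.com/Yunsang129/BAEKJOON | 프로그래머스/0/181926. 수 조작하기 1/수 조작하기 1.py | solution
-- ===== SOURCE A (Python) =====
-- def solution(n, control):
--     for dn in control:
--         if dn == "w":
--             n += 1
--         elif dn == "s":
--             n -= 1
--         elif dn =="d":
--             n += 10
--         else:
--             n -= 10
--     return n
-- ===== SOURCE B (Python) =====
-- def solution(n, control):
--     w = control.count("w")
--     s = control.count("s")
--     d = control.count("d")
--     return n + w - s + 10 * d - 10 * (len(control) - w - s - d)
-- ===== Notes on version B (the rewrite author's own statement) =====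
-- stated objective: faster
-- what changed: Replaces the per-character branching Python loop with three str.count() passes and one closed-form arithmetic expression (the catch-all -10 case handled as len(control) minus the three counts).
import Mathlib
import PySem

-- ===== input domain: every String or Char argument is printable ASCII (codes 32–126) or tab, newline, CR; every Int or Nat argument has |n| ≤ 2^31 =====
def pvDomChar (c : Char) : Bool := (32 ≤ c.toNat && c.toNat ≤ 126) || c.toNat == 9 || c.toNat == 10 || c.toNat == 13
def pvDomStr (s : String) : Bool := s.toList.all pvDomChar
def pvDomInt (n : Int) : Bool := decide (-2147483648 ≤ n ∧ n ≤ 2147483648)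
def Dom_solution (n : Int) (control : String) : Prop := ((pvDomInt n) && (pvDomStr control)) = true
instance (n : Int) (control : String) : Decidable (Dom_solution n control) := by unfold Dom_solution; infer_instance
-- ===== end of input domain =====

-- B replaces A's per-character branching loop by three substring counts and one closed-form arithmetic expression (objective: simpler).


-- ===== PORT A =====
-- literal transliteration of A: fold over the characters, branching per character
def solution (n : Int) (control : String) : Int :=
  control.toList.foldl
    (fun n dn =>
      if dn == 'w' then n + 1
      else if dn == 's' then n - 1
      else if dn == 'd' then n + 10
      else n - 10)
    n

-- ===== PORT B =====
-- literal transliteration of B: three str.count calls, one closed-form expression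
def solution_alt (n : Int) (control : String) : Int :=
  let w : Int := PySem.Str.count control "w"
  let s : Int := PySem.Str.count control "s"
  let d : Int := PySem.Str.count control "d"
  n + w - s + 10 * d - 10 * ((PySem.Str.len control : Int) - w - s - d)

-- ===== PRECONDITION & SPEC =====
def Spec_solution (n : Int) (control : String) (out : Int) : Prop := out = solution_alt n control
instance (n : Int) (control : String) (out : Int) : Decidable (Spec_solution n control out) := by unfold Spec_solution; infer_instance

-- ===== CLAIM (what is proved, stated in full; the proofs are below) =====
def Claim_equal_solution : Prop := ∀ (n : Int) (control : String), Dom_solution n control → Spec_solution n control (solution n control)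

-- ===== LEMMAS AND PROOFS =====

-- Chars.count.go for a single-character needle counts occurrences of that character
lemma count_go_singleton (c : Char) :
    ∀ (l : List Char) (fuel acc : Nat), l.length ≤ fuel →
      PySem.Chars.count.go [c] fuel l acc = acc + l.count c := by
  intro l
  induction l with
  | nil =>
      intro fuel acc _
      cases fuel <;> simp [PySem.Chars.count.go]
  | cons h t ih =>
      intro fuel acc hf
      cases fuel with
      | zero => simp at hf
      | succ f =>
          simp only [List.length_cons, Nat.succ_le_succ_iff] at hf
          by_cases hc : h = c
          · subst hc
            have : ([h].isPrefixOf (h :: t)) = true := by simp [List.isPrefixOf]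
            simp only [PySem.Chars.count.go, this, if_pos]
            rw [show List.drop [h].length (h :: t) = t by simp]
            rw [ih f (acc + 1) hf]
            simp
            omega
          · have h1 : (c == h) = false := by
              simp only [beq_eq_false_iff_ne, ne_eq]
              exact fun h' => hc h'.symm
            have h2 : (h == c) = false := by
              simp only [beq_eq_false_iff_ne, ne_eq]
              exact hc
            have hpre : ([c].isPrefixOf (h :: t)) = false := by
              simp [List.isPrefixOf, h1]
            simp only [PySem.Chars.count.go, hpre]
            rw [ih f acc hf]
            simp [List.count_cons, h2]

lemma chars_count_singleton (l : List Char) (c : Char) :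
    PySem.Chars.count l [c] = l.count c := by
  have h := count_go_singleton c l l.length 0 le_rfl
  simp [PySem.Chars.count, h]

lemma str_count_single (s : String) (c : Char) (t : String) (ht : t.toList = [c]) :
    PySem.Str.count s t = s.toList.count c := by
  rw [PySem.Str.count_eq, ht]
  exact chars_count_singleton s.toList c

-- the fold of A equals the closed form, by induction on the character list
lemma fold_closed (l : List Char) : ∀ (n : Int),
    l.foldl
      (fun n dn =>
        if dn == 'w' then n + 1
        else if dn == 's' then n - 1
        else if dn == 'd' then n + 10
        else n - 10)
      n
    = n + (l.count 'w' : Int) - l.count 's' + 10 * l.count 'd'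
        - 10 * ((l.length : Int) - l.count 'w' - l.count 's' - l.count 'd') := by
  induction l with
  | nil => intro n; simp
  | cons h t ih =>
      intro n
      simp only [List.foldl_cons, List.count_cons, List.length_cons]
      rw [ih]
      by_cases hw : h = 'w'
      · simp [hw]; ring
      · by_cases hs : h = 's'
        · simp [hs]; ring
        · by_cases hd : h = 'd'
          · simp [hd]; ring
          · simp [hw, hs, hd]; ring

-- ===== VERDICT (by name: the statement is the Claim_ definition above) =====
theorem solution_spec : Claim_equal_solution := by
  intro n control _
  unfold Spec_solution solution solution_alt
  have hw := str_count_single control 'w' "w" rfl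
  have hs := str_count_single control 's' "s" rfl
  have hd := str_count_single control 'd' "d" rfl
  rw [fold_closed, hw, hs, hd, PySem.Str.len_eq]
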